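-- pv_equiv track=rewrite | github.com/MOPE123-byte/Benchmarks | bridge.py | evaluate_bridge_hand
-- ===== SOURCE A (Python) =====
-- def evaluate_bridge_hand(hand):
--     # Define the values of the cards
--     card_values = {'A': 4, 'K': 3, 'Q': 2, 'J': 1, 'T': 0}
--
--     # Set variables to count HCP and the shape of the hand
--     hcp = 0
--     shape = [0, 0, 0, 0]  # Four suits: Spades, Hearts, Diamonds, Clubs
--
--     # Remove spaces and make the input case-insensitive
--     hand = hand.replace(" ", "").upper()
--
--     # Check if the input has exactly 13 characters
--     if len(hand) != 13:
--         return "Invalid hand."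
--
--     for card in hand:
--         if card in card_values:
--             # If the card is a high card, add its value to HCP
--             hcp += card_values[card]
--         elif card.isdigit() and card != '0':
--             # If the card is a digit (2-9), update the shape of the hand
--             suit_index = (int(card) - 1) % 4  # Calculate the suit index
--             shape[suit_index] += 1
--         elif card != 'X':
--             # If an invalid character is encountered, return an error message
--             return "Invalid hand."
--
--     # Format and print the results
--     result = f"{hcp} HCP\n{'='.join(map(str, shape))}"
--     return result
-- ===== SOURCE B (Python) =====
-- def evaluate_bridge_hand(hand):
--     # Validity check first, then aggregate HCP/shape with sum/count comprehensions
--     # (no early-return accumulation loop).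
--     card_values = {'A': 4, 'K': 3, 'Q': 2, 'J': 1, 'T': 0}
--     hand = hand.replace(" ", "").upper()
--     if len(hand) != 13:
--         return "Invalid hand."
--     if any(c not in card_values and not (c.isdigit() and c != '0') and c != 'X'
--            for c in hand):
--         return "Invalid hand."
--     hcp = sum(card_values.get(c, 0) for c in hand)
--     shape = [sum(1 for c in hand if c.isdigit() and c != '0' and (int(c) - 1) % 4 == i)
--              for i in range(4)]
--     return f"{hcp} HCP\n{'='.join(map(str, shape))}"
-- ===== Notes on version B (the rewrite author's own statement) =====
-- stated objective: alternative
-- what changed: Replaces A's single early-return loop that mutates hcp and a shape array with a two-phase decomposition: an any() validity check over the cleaned hand, then hcp as one sum() and the shape as four count comprehensions.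
import Mathlib
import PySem

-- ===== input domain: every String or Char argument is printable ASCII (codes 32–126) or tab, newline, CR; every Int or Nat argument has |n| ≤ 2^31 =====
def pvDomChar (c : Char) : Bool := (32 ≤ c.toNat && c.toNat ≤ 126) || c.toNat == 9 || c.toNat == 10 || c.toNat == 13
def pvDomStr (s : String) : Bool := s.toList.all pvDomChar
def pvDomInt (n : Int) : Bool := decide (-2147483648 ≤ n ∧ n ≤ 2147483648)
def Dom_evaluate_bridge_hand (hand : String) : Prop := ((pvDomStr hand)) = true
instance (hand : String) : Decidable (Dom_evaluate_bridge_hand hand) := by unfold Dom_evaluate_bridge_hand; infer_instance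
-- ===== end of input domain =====

-- B replaces A's early-return accumulation loop by a validity check followed by
-- sum/count aggregations (different decomposition; objective: alternative, same cost).

-- ===== PORT A =====
-- card_values = {'A': 4, 'K': 3, 'Q': 2, 'J': 1, 'T': 0}
def pvValuesA : PySem.Dict Char Int :=
  (((((PySem.Dict.empty.insert 'A' 4).insert 'K' 3).insert 'Q' 2).insert 'J' 1).insert 'T' 0)

-- A's for-loop over the hand, carrying (hcp, shape); early return on an invalid card
def pvLoopA : List Char → Int → List Int → String
  | [], hcp, shape =>
      PySem.Int.toStr hcp ++ " HCP\n" ++ PySem.Str.join "=" (shape.map PySem.Int.toStr)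
  | c :: rest, hcp, shape =>
      if pvValuesA.contains c then
        pvLoopA rest (hcp + pvValuesA.getD c 0) shape
      else if PySem.Chars.isdigit c && c != '0' then
        -- int(card) on a single character; exact here since isdigit c holds (ASCII digit)
        let idx := PySem.Int.mod ((PySem.Int.ofStr? (String.ofList [c])).getD 0 - 1) 4
        pvLoopA rest hcp (PySem.List.pySetD shape idx (PySem.List.pyGetD shape idx 0 + 1))
      else if c != 'X' then "Invalid hand."
      else pvLoopA rest hcp shape

def evaluate_bridge_hand (hand : String) : String :=
  let h := PySem.Str.upper (PySem.Str.replace hand " " "")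
  if PySem.Str.len h ≠ 13 then "Invalid hand."
  else pvLoopA h.toList 0 [0, 0, 0, 0]

-- ===== PORT B =====
def pvValuesB : PySem.Dict Char Int :=
  (((((PySem.Dict.empty.insert 'A' 4).insert 'K' 3).insert 'Q' 2).insert 'J' 1).insert 'T' 0)

-- (int(c) - 1) % 4 for a single character c; exact here since it is only
-- applied where isdigit c holds (ASCII digit)
def pvSuitB (c : Char) : Int :=
  PySem.Int.mod ((PySem.Int.ofStr? (String.ofList [c])).getD 0 - 1) 4

def evaluate_bridge_hand_alt (hand : String) : String :=
  let h := PySem.Str.upper (PySem.Str.replace hand " " "")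
  let cs := h.toList
  if PySem.Str.len h ≠ 13 then "Invalid hand."
  else if cs.any (fun c =>
      !pvValuesB.contains c && !(PySem.Chars.isdigit c && c != '0') && c != 'X') then
    "Invalid hand."
  else
    let hcp := (cs.map (fun c => pvValuesB.getD c 0)).sum
    let shape := (List.range 4).map (fun i =>
      ((cs.countP (fun c =>
          PySem.Chars.isdigit c && c != '0' && pvSuitB c == (i : Int))) : Int))
    PySem.Int.toStr hcp ++ " HCP\n" ++ PySem.Str.join "=" (shape.map PySem.Int.toStr)

-- ===== PRECONDITION & SPEC =====
def Spec_evaluate_bridge_hand (hand : String) (out : String) : Prop := out = evaluate_bridge_hand_alt hand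
instance (hand : String) (out : String) : Decidable (Spec_evaluate_bridge_hand hand out) := by unfold Spec_evaluate_bridge_hand; infer_instance

-- ===== CLAIM (what is proved, stated in full; the proofs are below) =====
def Claim_equal_evaluate_bridge_hand : Prop := ∀ (hand : String), Dom_evaluate_bridge_hand hand → Spec_evaluate_bridge_hand hand (evaluate_bridge_hand hand)

-- ===== LEMMAS AND PROOFS =====

-- a character on which A's loop returns "Invalid hand." early
def pvBad (c : Char) : Bool :=
  !pvValuesA.contains c && !(PySem.Chars.isdigit c && c != '0') && c != 'X'

def pvCnt (i : Nat) (cs : List Char) : Int :=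
  ((cs.countP (fun c => PySem.Chars.isdigit c && c != '0' && pvSuitB c == (i : Int))) : Int)

theorem charEqOfToNat (c d : Char) (h : c.toNat = d.toNat) : c = d := by
  apply Char.ext; apply UInt32.toNat_inj.mp; exact h

theorem pvContains_cases (c : Char) (h : pvValuesA.contains c = true) :
    c = 'A' ∨ c = 'K' ∨ c = 'Q' ∨ c = 'J' ∨ c = 'T' := by
  simp [pvValuesA, PySem.Dict.contains, PySem.Dict.insert, PySem.Dict.empty] at h
  tauto

theorem pvDigit_cases (c : Char) (h : PySem.Chars.isdigit c = true) (h0 : c ≠ '0') :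
    c = '1' ∨ c = '2' ∨ c = '3' ∨ c = '4' ∨ c = '5' ∨ c = '6' ∨ c = '7' ∨ c = '8' ∨ c = '9' := by
  have hb : 48 ≤ c.toNat ∧ c.toNat ≤ 57 := by
    simp [PySem.Chars.isdigit] at h
    rcases h with ⟨h1, h2⟩
    rw [Char.le_def, UInt32.le_iff_toNat_le] at h1 h2
    exact ⟨h1, h2⟩
  have h48 : c.toNat ≠ 48 := fun hc => h0 (charEqOfToNat c '0' hc)
  have hv : c.toNat = 49 ∨ c.toNat = 50 ∨ c.toNat = 51 ∨ c.toNat = 52 ∨ c.toNat = 53 ∨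
      c.toNat = 54 ∨ c.toNat = 55 ∨ c.toNat = 56 ∨ c.toNat = 57 := by omega
  rcases hv with h|h|h|h|h|h|h|h|h
  · exact Or.inl (charEqOfToNat _ _ h)
  · exact Or.inr (Or.inl (charEqOfToNat _ _ h))
  · exact Or.inr (Or.inr (Or.inl (charEqOfToNat _ _ h)))
  · exact Or.inr (Or.inr (Or.inr (Or.inl (charEqOfToNat _ _ h))))
  · exact Or.inr (Or.inr (Or.inr (Or.inr (Or.inl (charEqOfToNat _ _ h)))))
  · exact Or.inr (Or.inr (Or.inr (Or.inr (Or.inr (Or.inl (charEqOfToNat _ _ h))))))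
  · exact Or.inr (Or.inr (Or.inr (Or.inr (Or.inr (Or.inr (Or.inl (charEqOfToNat _ _ h)))))))
  · exact Or.inr (Or.inr (Or.inr (Or.inr (Or.inr (Or.inr (Or.inr (Or.inl (charEqOfToNat _ _ h))))))))
  · exact Or.inr (Or.inr (Or.inr (Or.inr (Or.inr (Or.inr (Or.inr (Or.inr (charEqOfToNat _ _ h))))))))


set_option maxHeartbeats 1000000 in
theorem pvLoopA_eq (cs : List Char) (hcp s0 s1 s2 s3 : Int) :
    pvLoopA cs hcp [s0, s1, s2, s3] =
      if cs.any pvBad then "Invalid hand."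
      else
        PySem.Int.toStr (hcp + (cs.map (fun c => pvValuesA.getD c 0)).sum) ++ " HCP\n" ++
          PySem.Str.join "="
            (([s0 + pvCnt 0 cs, s1 + pvCnt 1 cs, s2 + pvCnt 2 cs, s3 + pvCnt 3 cs]).map
              PySem.Int.toStr) := by
  induction cs generalizing hcp s0 s1 s2 s3 with
  | nil => simp [pvLoopA, pvCnt]
  | cons c cs ih =>
    by_cases hc : pvValuesA.contains c = true
    · rcases pvContains_cases c hc with h|h|h|h|h <;> subst h <;>
        rw [pvLoopA, if_pos (by decide)] <;> rw [ih] <;>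
        simp [pvBad, pvCnt, List.countP_cons, hc, add_assoc]
    · by_cases hd : (PySem.Chars.isdigit c && c != '0') = true
      · rw [Bool.and_eq_true] at hd
        have h0 : c ≠ '0' := by simpa using hd.2
        rcases pvDigit_cases c hd.1 h0 with h|h|h|h|h|h|h|h|h
        · subst h
          rw [pvLoopA, if_neg (by decide), if_pos (by decide)]
          simp only [show PySem.Int.mod ((PySem.Int.ofStr? (String.ofList ['1'])).getD 0 - 1) 4 = (0 : Int) from by decide]
          rw [show PySem.List.pySetD [s0, s1, s2, s3] (0 : Int) (PySem.List.pyGetD [s0, s1, s2, s3] (0 : Int) 0 + 1) = [s0 + 1, s1, s2, s3] from by simp [pysem]]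
          rw [ih]
          simp [pvBad, pvCnt, List.countP_cons, (by decide : pvSuitB '1' = (0 : Int)),
            (by decide : PySem.Chars.isdigit '1' = true),
            (by decide : pvValuesA.contains '1' = false),
            (by decide : pvValuesA.getD '1' 0 = (0 : Int)),
            add_assoc, add_comm, add_left_comm]
        · subst h
          rw [pvLoopA, if_neg (by decide), if_pos (by decide)]
          simp only [show PySem.Int.mod ((PySem.Int.ofStr? (String.ofList ['2'])).getD 0 - 1) 4 = (1 : Int) from by decide]
          rw [show PySem.List.pySetD [s0, s1, s2, s3] (1 : Int) (PySem.List.pyGetD [s0, s1, s2, s3] (1 : Int) 0 + 1) = [s0, s1 + 1, s2, s3] from by simp [pysem]]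
          rw [ih]
          simp [pvBad, pvCnt, List.countP_cons, (by decide : pvSuitB '2' = (1 : Int)),
            (by decide : PySem.Chars.isdigit '2' = true),
            (by decide : pvValuesA.contains '2' = false),
            (by decide : pvValuesA.getD '2' 0 = (0 : Int)),
            add_assoc, add_comm, add_left_comm]
        · subst h
          rw [pvLoopA, if_neg (by decide), if_pos (by decide)]
          simp only [show PySem.Int.mod ((PySem.Int.ofStr? (String.ofList ['3'])).getD 0 - 1) 4 = (2 : Int) from by decide]
          rw [show PySem.List.pySetD [s0, s1, s2, s3] (2 : Int) (PySem.List.pyGetD [s0, s1, s2, s3] (2 : Int) 0 + 1) = [s0, s1, s2 + 1, s3] from by simp [pysem]]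
          rw [ih]
          simp [pvBad, pvCnt, List.countP_cons, (by decide : pvSuitB '3' = (2 : Int)),
            (by decide : PySem.Chars.isdigit '3' = true),
            (by decide : pvValuesA.contains '3' = false),
            (by decide : pvValuesA.getD '3' 0 = (0 : Int)),
            add_assoc, add_comm, add_left_comm]
        · subst h
          rw [pvLoopA, if_neg (by decide), if_pos (by decide)]
          simp only [show PySem.Int.mod ((PySem.Int.ofStr? (String.ofList ['4'])).getD 0 - 1) 4 = (3 : Int) from by decide]
          rw [show PySem.List.pySetD [s0, s1, s2, s3] (3 : Int) (PySem.List.pyGetD [s0, s1, s2, s3] (3 : Int) 0 + 1) = [s0, s1, s2, s3 + 1] from by simp [pysem]]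
          rw [ih]
          simp [pvBad, pvCnt, List.countP_cons, (by decide : pvSuitB '4' = (3 : Int)),
            (by decide : PySem.Chars.isdigit '4' = true),
            (by decide : pvValuesA.contains '4' = false),
            (by decide : pvValuesA.getD '4' 0 = (0 : Int)),
            add_assoc, add_comm, add_left_comm]
        · subst h
          rw [pvLoopA, if_neg (by decide), if_pos (by decide)]
          simp only [show PySem.Int.mod ((PySem.Int.ofStr? (String.ofList ['5'])).getD 0 - 1) 4 = (0 : Int) from by decide]
          rw [show PySem.List.pySetD [s0, s1, s2, s3] (0 : Int) (PySem.List.pyGetD [s0, s1, s2, s3] (0 : Int) 0 + 1) = [s0 + 1, s1, s2, s3] from by simp [pysem]]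
          rw [ih]
          simp [pvBad, pvCnt, List.countP_cons, (by decide : pvSuitB '5' = (0 : Int)),
            (by decide : PySem.Chars.isdigit '5' = true),
            (by decide : pvValuesA.contains '5' = false),
            (by decide : pvValuesA.getD '5' 0 = (0 : Int)),
            add_assoc, add_comm, add_left_comm]
        · subst h
          rw [pvLoopA, if_neg (by decide), if_pos (by decide)]
          simp only [show PySem.Int.mod ((PySem.Int.ofStr? (String.ofList ['6'])).getD 0 - 1) 4 = (1 : Int) from by decide]
          rw [show PySem.List.pySetD [s0, s1, s2, s3] (1 : Int) (PySem.List.pyGetD [s0, s1, s2, s3] (1 : Int) 0 + 1) = [s0, s1 + 1, s2, s3] from by simp [pysem]]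
          rw [ih]
          simp [pvBad, pvCnt, List.countP_cons, (by decide : pvSuitB '6' = (1 : Int)),
            (by decide : PySem.Chars.isdigit '6' = true),
            (by decide : pvValuesA.contains '6' = false),
            (by decide : pvValuesA.getD '6' 0 = (0 : Int)),
            add_assoc, add_comm, add_left_comm]
        · subst h
          rw [pvLoopA, if_neg (by decide), if_pos (by decide)]
          simp only [show PySem.Int.mod ((PySem.Int.ofStr? (String.ofList ['7'])).getD 0 - 1) 4 = (2 : Int) from by decide]
          rw [show PySem.List.pySetD [s0, s1, s2, s3] (2 : Int) (PySem.List.pyGetD [s0, s1, s2, s3] (2 : Int) 0 + 1) = [s0, s1, s2 + 1, s3] from by simp [pysem]]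
          rw [ih]
          simp [pvBad, pvCnt, List.countP_cons, (by decide : pvSuitB '7' = (2 : Int)),
            (by decide : PySem.Chars.isdigit '7' = true),
            (by decide : pvValuesA.contains '7' = false),
            (by decide : pvValuesA.getD '7' 0 = (0 : Int)),
            add_assoc, add_comm, add_left_comm]
        · subst h
          rw [pvLoopA, if_neg (by decide), if_pos (by decide)]
          simp only [show PySem.Int.mod ((PySem.Int.ofStr? (String.ofList ['8'])).getD 0 - 1) 4 = (3 : Int) from by decide]
          rw [show PySem.List.pySetD [s0, s1, s2, s3] (3 : Int) (PySem.List.pyGetD [s0, s1, s2, s3] (3 : Int) 0 + 1) = [s0, s1, s2, s3 + 1] from by simp [pysem]]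
          rw [ih]
          simp [pvBad, pvCnt, List.countP_cons, (by decide : pvSuitB '8' = (3 : Int)),
            (by decide : PySem.Chars.isdigit '8' = true),
            (by decide : pvValuesA.contains '8' = false),
            (by decide : pvValuesA.getD '8' 0 = (0 : Int)),
            add_assoc, add_comm, add_left_comm]
        · subst h
          rw [pvLoopA, if_neg (by decide), if_pos (by decide)]
          simp only [show PySem.Int.mod ((PySem.Int.ofStr? (String.ofList ['9'])).getD 0 - 1) 4 = (0 : Int) from by decide]
          rw [show PySem.List.pySetD [s0, s1, s2, s3] (0 : Int) (PySem.List.pyGetD [s0, s1, s2, s3] (0 : Int) 0 + 1) = [s0 + 1, s1, s2, s3] from by simp [pysem]]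
          rw [ih]
          simp [pvBad, pvCnt, List.countP_cons, (by decide : pvSuitB '9' = (0 : Int)),
            (by decide : PySem.Chars.isdigit '9' = true),
            (by decide : pvValuesA.contains '9' = false),
            (by decide : pvValuesA.getD '9' 0 = (0 : Int)),
            add_assoc, add_comm, add_left_comm]
      · by_cases hx : c = 'X'
        · subst hx
          rw [pvLoopA, if_neg (by decide), if_neg (by decide), if_neg (by decide)]
          rw [ih]
          simp [pvBad, pvCnt, (by decide : pvValuesA.getD 'X' 0 = (0 : Int)),
            (by decide : pvValuesA.contains 'X' = false),
            (by decide : PySem.Chars.isdigit 'X' = false), List.countP_cons]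
        · rw [pvLoopA, if_neg hc, if_neg hd, if_pos (by simpa using hx)]
          have hb : pvBad c = true := by simp [pvBad, hc, hd, hx]
          simp [List.any_cons, hb]

-- ===== VERDICT (by name: the statement is the Claim_ definition above) =====
theorem evaluate_bridge_hand_spec : Claim_equal_evaluate_bridge_hand := by
  intro hand _
  unfold Spec_evaluate_bridge_hand evaluate_bridge_hand evaluate_bridge_hand_alt
  simp only []
  by_cases hl : PySem.Str.len (PySem.Str.upper (PySem.Str.replace hand " " "")) ≠ 13
  · rw [if_pos hl, if_pos hl]
  · rw [if_neg hl, if_neg hl]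
    rw [pvLoopA_eq]
    simp [pvBad, pvCnt, pvValuesB, pvValuesA, List.range_succ]
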